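-- pv_equiv track=rewrite | github.com/RyannDaGreat/rp | rp_ptpython/selection_utils.py | get_bracket_spans
-- ===== SOURCE A (Python) =====
-- from typing import List, Tuple, Optional, Set
--
-- Span = Tuple[int, int]
--
-- def get_bracket_spans(code: str) -> Set[Span]:
--     """Spans for bracket contents and brackets+contents."""
--     spans = set()
--     for op, cl in [('(', ')'), ('[', ']'), ('{', '}')]:
--         i = 0
--         while i < len(code):
--             if code[i] == op:
--                 depth, j = 1, i + 1
--                 while j < len(code) and depth > 0:
--                     depth += (code[j] == op) - (code[j] == cl)
--                     j += 1
--                 if depth == 0: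
--                     if j - 1 > i + 1:
--                         spans.add((i + 1, j - 1))
--                     spans.add((i, j))
--             i += 1
--     return spans
-- ===== SOURCE B (Python) =====
-- def get_bracket_spans(code):
--     """Spans for bracket contents and brackets+contents."""
--     spans = set()
--     n = len(code)
--     for op, cl in [('(', ')'), ('[', ']'), ('{', '}')]:
--         stack = []
--         match = {}
--         for j, ch in enumerate(code):
--             if ch == op:
--                 stack.append(j)
--             elif ch == cl and stack:
--                 match[stack.pop()] = j
--         for i in range(n):
--             if i in match:
--                 j = match[i]
--                 if j > i + 1:
--                     spans.add((i + 1, j))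
--                 spans.add((i, j + 1))
--     return spans
-- ===== Notes on version B (the rewrite author's own statement) =====
-- stated objective: alternative
-- what changed: Replaced the per-opening forward rescan (for every open bracket, scan ahead counting depth) by a single stack pass per bracket type that records each open's matching close in a dict, then emits spans by opening position.
import Mathlib
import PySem

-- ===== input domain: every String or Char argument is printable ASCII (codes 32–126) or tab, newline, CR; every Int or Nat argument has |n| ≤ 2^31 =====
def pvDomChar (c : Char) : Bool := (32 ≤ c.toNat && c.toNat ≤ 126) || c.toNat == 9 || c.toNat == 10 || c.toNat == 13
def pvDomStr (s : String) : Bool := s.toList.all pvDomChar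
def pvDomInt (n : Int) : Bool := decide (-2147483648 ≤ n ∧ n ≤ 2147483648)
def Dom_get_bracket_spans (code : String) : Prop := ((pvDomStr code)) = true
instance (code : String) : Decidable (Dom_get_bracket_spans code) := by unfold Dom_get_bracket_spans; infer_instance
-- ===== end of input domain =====

-- B replaces A's per-opening forward rescan by one stack pass per bracket type (recording each
-- open's matching close), then emits spans by opening position; same returned set of spans.

-- ===== PORT A =====
-- (code[j] == op) - (code[j] == cl), the depth increment of A's inner scan
def pvDelta (op cl c : Char) : Int :=
  (if c = op then 1 else 0) - (if c = cl then 1 else 0)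

-- the inner 'while j < len(code) and depth > 0' loop of A; returns the final (depth, j)
def pvInner (cs : List Char) (op cl : Char) (j : Nat) (depth : Int) : Int × Nat :=
  if h : j < cs.length ∧ 0 < depth then
    pvInner cs op cl (j + 1) (depth + pvDelta op cl (cs.getD j ' '))
  else (depth, j)
termination_by cs.length - j
decreasing_by omega

-- A's body for one (op, cl) pair: the outer 'while i < len(code)' loop
def pvTypeA (code : String) (op cl : Char) (spans : List (Int × Int)) : List (Int × Int) :=
  (List.range code.toList.length).foldl (fun spans i =>
    if code.toList.getD i ' ' = op then
      let dj := pvInner code.toList op cl (i + 1) 1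
      if dj.1 = 0 then
        let spans' :=
          if ((dj.2 : Int) - 1 > (i : Int) + 1) then
            PySem.Set.add spans ((i : Int) + 1, (dj.2 : Int) - 1)
          else spans
        PySem.Set.add spans' ((i : Int), (dj.2 : Int))
      else spans
    else spans) spans

def get_bracket_spans (code : String) : List (Int × Int) :=
  [('(', ')'), ('[', ']'), ('{', '}')].foldl
    (fun spans p => pvTypeA code p.1 p.2 spans) []

-- ===== PORT B =====
-- B's stack pass: push opens, on a close pop the most recent open and record the match
def pvStk (op cl : Char) : List Char → Nat → List Nat × PySem.Dict Nat Nat →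
    List Nat × PySem.Dict Nat Nat
  | [], _, st => st
  | c :: rest, j, (stack, m) =>
    if c = op then pvStk op cl rest (j + 1) (j :: stack, m)
    else if c = cl then
      match stack with
      | [] => pvStk op cl rest (j + 1) ([], m)
      | i :: s => pvStk op cl rest (j + 1) (s, m.insert i j)
    else pvStk op cl rest (j + 1) (stack, m)

-- B's body for one (op, cl) pair: stack pass, then emit spans by opening position
def pvTypeB (code : String) (op cl : Char) (spans : List (Int × Int)) : List (Int × Int) :=
  let m := (pvStk op cl code.toList 0 ([], PySem.Dict.empty)).2
  (List.range code.toList.length).foldl (fun spans i =>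
    match m.get? i with
    | some j =>
      let spans' :=
        if ((j : Int) > (i : Int) + 1) then
          PySem.Set.add spans ((i : Int) + 1, (j : Int))
        else spans
      PySem.Set.add spans' ((i : Int), (j : Int) + 1)
    | none => spans) spans

def get_bracket_spans_alt (code : String) : List (Int × Int) :=
  [('(', ')'), ('[', ']'), ('{', '}')].foldl
    (fun spans p => pvTypeB code p.1 p.2 spans) []

-- ===== PRECONDITION & SPEC =====
def Spec_get_bracket_spans (code : String) (out : List (Int × Int)) : Prop := out = get_bracket_spans_alt code
instance (code : String) (out : List (Int × Int)) : Decidable (Spec_get_bracket_spans code out) := by unfold Spec_get_bracket_spans; infer_instance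

-- ===== CLAIM (what is proved, stated in full; the proofs are below) =====
def Claim_equal_get_bracket_spans : Prop := ∀ (code : String), Dom_get_bracket_spans code → Spec_get_bracket_spans code (get_bracket_spans code)

-- ===== LEMMAS AND PROOFS =====

-- prefix balance: #op minus #cl among the first k characters
def pvPre (cs : List Char) (op cl : Char) (k : Nat) : Int :=
  ((cs.take k).map (pvDelta op cl)).sum

-- "the open at i is closed exactly at j-1": balance returns to its value at i first at j
def pvIsMatch (cs : List Char) (op cl : Char) (i j : Nat) : Prop :=
  i < j ∧ j ≤ cs.length ∧ pvPre cs op cl j = pvPre cs op cl i ∧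
    ∀ l, i < l → l < j → pvPre cs op cl i < pvPre cs op cl l

lemma pvDelta_op {op cl : Char} (hop : op ≠ cl) : pvDelta op cl op = 1 := by
  simp [pvDelta, hop]

lemma pvDelta_cl {op cl : Char} (hop : op ≠ cl) : pvDelta op cl cl = -1 := by
  simp [pvDelta, Ne.symm hop]

lemma pvDelta_other {op cl c : Char} (h1 : c ≠ op) (h2 : c ≠ cl) : pvDelta op cl c = 0 := by
  simp [pvDelta, h1, h2]

lemma pvDelta_bounds (op cl c : Char) : -1 ≤ pvDelta op cl c ∧ pvDelta op cl c ≤ 1 := by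
  unfold pvDelta; split_ifs <;> omega

lemma pvPre_succ (cs : List Char) (op cl : Char) (k : Nat) (hk : k < cs.length) :
    pvPre cs op cl (k + 1) = pvPre cs op cl k + pvDelta op cl (cs.getD k ' ') := by
  unfold pvPre
  rw [List.take_add_one, List.getElem?_eq_getElem hk, List.map_append, List.sum_append,
    List.getD_eq_getElem cs ' ' hk]
  simp

lemma pvIsMatch_unique {cs : List Char} {op cl : Char} {i j₁ j₂ : Nat}
    (h1 : pvIsMatch cs op cl i j₁) (h2 : pvIsMatch cs op cl i j₂) : j₁ = j₂ := by
  obtain ⟨hi1, hn1, he1, hp1⟩ := h1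
  obtain ⟨hi2, hn2, he2, hp2⟩ := h2
  rcases Nat.lt_trichotomy j₁ j₂ with h | h | h
  · have := hp2 j₁ hi1 h; omega
  · exact h
  · have := hp1 j₂ hi2 h; omega

-- characterisation of A's inner scan: it stops at the first position where the depth
-- (= d plus the balance change since j₀) is no longer positive, or at the end of the string
theorem pvInner_spec (cs : List Char) (op cl : Char) (j₀ : Nat) (d : Int)
    (hj : j₀ ≤ cs.length) (hd : 0 < d) :
    j₀ ≤ (pvInner cs op cl j₀ d).2 ∧ (pvInner cs op cl j₀ d).2 ≤ cs.length ∧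
    (pvInner cs op cl j₀ d).1 =
      d + (pvPre cs op cl (pvInner cs op cl j₀ d).2 - pvPre cs op cl j₀) ∧
    (∀ l, j₀ ≤ l → l < (pvInner cs op cl j₀ d).2 →
      0 < d + (pvPre cs op cl l - pvPre cs op cl j₀)) ∧
    ((pvInner cs op cl j₀ d).2 < cs.length → (pvInner cs op cl j₀ d).1 ≤ 0) ∧
    0 ≤ (pvInner cs op cl j₀ d).1 := by
  by_cases h : j₀ < cs.length ∧ 0 < d
  · have hstep := pvPre_succ cs op cl j₀ h.1
    have hδ := pvDelta_bounds op cl (cs.getD j₀ ' ')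
    by_cases h' : 0 < d + pvDelta op cl (cs.getD j₀ ' ')
    · have ih := pvInner_spec cs op cl (j₀ + 1) (d + pvDelta op cl (cs.getD j₀ ' ')) h.1 h'
      rw [pvInner, dif_pos h]
      obtain ⟨c1, c2, c3, c4, c5, c6⟩ := ih
      refine ⟨by omega, c2, by omega, ?_, by omega, c6⟩
      intro l hl1 hl2
      rcases Nat.eq_or_lt_of_le hl1 with rfl | hl1'
      · omega
      · have := c4 l hl1' hl2; omega
    · rw [pvInner, dif_pos h, pvInner, dif_neg (by omega)]
      refine ⟨by dsimp only; omega, by dsimp only; omega, by dsimp only; omega, ?_,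
        by dsimp only; omega, by dsimp only; omega⟩
      intro l hl1 hl2
      dsimp only at hl2
      have : l = j₀ := by omega
      subst this
      omega
  · rw [pvInner, dif_neg h]
    have hj' : j₀ = cs.length ∨ j₀ < cs.length := by omega
    refine ⟨le_refl _, hj, by dsimp only; omega, ?_, by dsimp only; omega, by dsimp only; omega⟩
    intro l hl1 hl2
    dsimp only at hl2
    omega
termination_by cs.length - j₀
decreasing_by omega

-- the invariant of B's stack pass after the first k characters:
-- the stack holds the still-open positions (top first, with their depths),
-- and m holds exactly the matches whose close lies before position k
def pvStkInv (cs : List Char) (op cl : Char) (k : Nat) (stack : List Nat)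
    (m : PySem.Dict Nat Nat) : Prop :=
  (∀ s (hs : s < stack.length),
      stack[s] < k ∧ cs.getD stack[s] ' ' = op ∧
      pvPre cs op cl k = pvPre cs op cl stack[s] + s + 1 ∧
      (∀ l, stack[s] < l → l ≤ k → pvPre cs op cl stack[s] < pvPre cs op cl l)) ∧
  (∀ i j, m.get? i = some j ↔
      (j < k ∧ cs.getD i ' ' = op ∧ pvIsMatch cs op cl i (j + 1))) ∧
  (∀ i, i < k → cs.getD i ' ' = op → i ∈ stack ∨ (m.get? i).isSome = true)

lemma pvStk_run (cs : List Char) (op cl : Char) (hop : op ≠ cl) (k : Nat)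
    (stack : List Nat) (m : PySem.Dict Nat Nat) (hk : k ≤ cs.length)
    (hinv : pvStkInv cs op cl k stack m) :
    pvStkInv cs op cl cs.length (pvStk op cl (cs.drop k) k (stack, m)).1
      (pvStk op cl (cs.drop k) k (stack, m)).2 := by
  by_cases hlt : k < cs.length
  · have hdrop : cs.drop k = cs.getD k ' ' :: cs.drop (k + 1) := by
      rw [List.drop_eq_getElem_cons hlt, List.getD_eq_getElem cs ' ' hlt]
    have hstep := pvPre_succ cs op cl k hlt
    obtain ⟨S, M, C⟩ := hinv
    rw [hdrop]
    by_cases hco : cs.getD k ' ' = op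
    · -- an opening bracket: push k
      have hδ : pvDelta op cl (cs.getD k ' ') = 1 := by rw [hco]; exact pvDelta_op hop
      simp only [pvStk, if_pos hco]
      refine pvStk_run cs op cl hop (k + 1) (k :: stack) m (by omega) ⟨?_, ?_, ?_⟩
      · intro s hs
        cases s with
        | zero =>
          simp only [List.getElem_cons_zero]
          refine ⟨by omega, hco, by push_cast; omega, ?_⟩
          intro l hl1 hl2
          have : l = k + 1 := by omega
          subst this; omega
        | succ s' =>
          simp only [List.getElem_cons_succ]
          have hs' : s' < stack.length := by simpa using hs
          obtain ⟨h1, h2, h3, h4⟩ := S s' hs'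
          refine ⟨by omega, h2, by push_cast at h3 ⊢; omega, ?_⟩
          intro l hl1 hl2
          rcases Nat.lt_or_ge l (k + 1) with h | h
          · exact h4 l hl1 (by omega)
          · have : l = k + 1 := by omega
            subst this; omega
      · intro i j
        rw [M i j]
        constructor
        · rintro ⟨hj, hio, hm⟩; exact ⟨by omega, hio, hm⟩
        · rintro ⟨hj, hio, hm⟩
          refine ⟨?_, hio, hm⟩
          by_contra hjk
          have hjk' : j = k := by omega
          rw [hjk'] at hm
          obtain ⟨hm1, hm2, hm3, hm4⟩ := hm
          rcases Nat.lt_or_ge i k with hik' | hik'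
          · rcases C i hik' hio with hmem | hsome
            · obtain ⟨s, hs, hsi⟩ := List.mem_iff_getElem.mp hmem
              obtain ⟨_, _, h3, _⟩ := S s hs
              rw [hsi] at h3
              omega
            · obtain ⟨j₀, hj₀⟩ := Option.isSome_iff_exists.mp hsome
              obtain ⟨hj₀k, _, hm₀⟩ := (M i j₀).mp hj₀
              have := pvIsMatch_unique hm₀ ⟨hm1, hm2, hm3, hm4⟩
              omega
          · have hik : i = k := by omega
            rw [hik] at hm3
            omega
      · intro i hi hio
        rcases Nat.lt_or_ge i k with h | h
        · rcases C i h hio with hmem | hsome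
          · exact Or.inl (List.mem_cons_of_mem _ hmem)
          · exact Or.inr hsome
        · have hik : i = k := by omega
          rw [hik]
          exact Or.inl List.mem_cons_self
    · by_cases hcc : cs.getD k ' ' = cl
      · have hδ : pvDelta op cl (cs.getD k ' ') = -1 := by rw [hcc]; exact pvDelta_cl hop
        rcases stack with _ | ⟨t, rest⟩
        · -- a closing bracket with an empty stack: skip
          simp only [pvStk, if_neg hco, if_pos hcc]
          refine pvStk_run cs op cl hop (k + 1) [] m (by omega) ⟨?_, ?_, ?_⟩
          · intro s hs; simp at hs
          · intro i j
            rw [M i j]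
            constructor
            · rintro ⟨hj, hio, hm⟩; exact ⟨by omega, hio, hm⟩
            · rintro ⟨hj, hio, hm⟩
              refine ⟨?_, hio, hm⟩
              by_contra hjk
              have hjk' : j = k := by omega
              rw [hjk'] at hm
              obtain ⟨hm1, hm2, hm3, hm4⟩ := hm
              rcases Nat.lt_or_ge i k with hik' | hik'
              · rcases C i hik' hio with hmem | hsome
                · simp at hmem
                · obtain ⟨j₀, hj₀⟩ := Option.isSome_iff_exists.mp hsome
                  obtain ⟨hj₀k, _, hm₀⟩ := (M i j₀).mp hj₀
                  have := pvIsMatch_unique hm₀ ⟨hm1, hm2, hm3, hm4⟩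
                  omega
              · have hik : i = k := by omega
                rw [hik] at hio
                exact hop (hio.symm.trans hcc)
          · intro i hi hio
            rcases Nat.lt_or_ge i k with h | h
            · rcases C i h hio with hmem | hsome
              · simp at hmem
              · exact Or.inr hsome
            · have hik : i = k := by omega
              rw [hik] at hio
              exact absurd (hio.symm.trans hcc) hop
        · -- a closing bracket: pop the top open t, record the match (t, k)
          have hS0 := S 0 (by simp)
          simp only [List.getElem_cons_zero] at hS0
          obtain ⟨ht_lt, ht_op, ht_pre, ht_pos⟩ := hS0
          push_cast at ht_pre
          have hmt : pvIsMatch cs op cl t (k + 1) := by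
            refine ⟨by omega, by omega, by omega, ?_⟩
            intro l hl1 hl2
            exact ht_pos l hl1 (by omega)
          simp only [pvStk, if_neg hco, if_pos hcc]
          refine pvStk_run cs op cl hop (k + 1) rest (m.insert t k) (by omega) ⟨?_, ?_, ?_⟩
          · intro s hs
            have hSs := S (s + 1) (by simpa using Nat.succ_lt_succ hs)
            simp only [List.getElem_cons_succ] at hSs
            obtain ⟨h1, h2, h3, h4⟩ := hSs
            push_cast at h3
            refine ⟨by omega, h2, by omega, ?_⟩
            intro l hl1 hl2
            rcases Nat.lt_or_ge l (k + 1) with h | h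
            · exact h4 l hl1 (by omega)
            · have : l = k + 1 := by omega
              subst this; omega
          · intro i j
            rw [PySem.Dict.get?_insert]
            by_cases hit : i = t
            · subst hit
              rw [if_pos rfl]
              constructor
              · intro h
                have hj : j = k := by
                  have := Option.some.inj h; omega
                subst hj
                exact ⟨by omega, ht_op, hmt⟩
              · rintro ⟨hjk1, hio, hm⟩
                have huniq := pvIsMatch_unique hm hmt
                have : j = k := by omega
                subst this; rfl
            · rw [if_neg hit, M i j]
              constructor
              · rintro ⟨hj, hio, hm⟩; exact ⟨by omega, hio, hm⟩
              · rintro ⟨hj, hio, hm⟩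
                refine ⟨?_, hio, hm⟩
                by_contra hjk
                have hjk' : j = k := by omega
                rw [hjk'] at hm
                obtain ⟨hm1, hm2, hm3, hm4⟩ := hm
                rcases Nat.lt_or_ge i k with hik' | hik'
                · rcases C i hik' hio with hmem | hsome
                  · rcases List.mem_cons.mp hmem with rfl | hmem'
                    · exact hit rfl
                    · obtain ⟨s, hs, hsi⟩ := List.mem_iff_getElem.mp hmem'
                      have hSs := S (s + 1) (by simpa using Nat.succ_lt_succ hs)
                      simp only [List.getElem_cons_succ] at hSs
                      obtain ⟨_, _, h3, _⟩ := hSs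
                      rw [hsi] at h3
                      push_cast at h3
                      omega
                  · obtain ⟨j₀, hj₀⟩ := Option.isSome_iff_exists.mp hsome
                    obtain ⟨hj₀k, _, hm₀⟩ := (M i j₀).mp hj₀
                    have := pvIsMatch_unique hm₀ ⟨hm1, hm2, hm3, hm4⟩
                    omega
                · have hik : i = k := by omega
                  rw [hik] at hio
                  exact hop (hio.symm.trans hcc)
          · intro i hi hio
            rcases Nat.lt_or_ge i k with h | h
            · rcases C i h hio with hmem | hsome
              · rcases List.mem_cons.mp hmem with rfl | hmem'
                · right; rw [PySem.Dict.get?_insert, if_pos rfl]; rfl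
                · exact Or.inl hmem'
              · right
                rw [PySem.Dict.get?_insert]
                split_ifs
                · rfl
                · exact hsome
            · have hik : i = k := by omega
              rw [hik] at hio
              exact absurd (hio.symm.trans hcc) hop
      · -- not a bracket of this pair: skip
        have hδ : pvDelta op cl (cs.getD k ' ') = 0 := pvDelta_other hco hcc
        simp only [pvStk, if_neg hco, if_neg hcc]
        refine pvStk_run cs op cl hop (k + 1) stack m (by omega) ⟨?_, ?_, ?_⟩
        · intro s hs
          obtain ⟨h1, h2, h3, h4⟩ := S s hs
          refine ⟨by omega, h2, by omega, ?_⟩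
          intro l hl1 hl2
          rcases Nat.lt_or_ge l (k + 1) with h | h
          · exact h4 l hl1 (by omega)
          · have hl : l = k + 1 := by omega
            subst hl
            have := h4 k h1 (le_refl k)
            omega
        · intro i j
          rw [M i j]
          constructor
          · rintro ⟨hj, hio, hm⟩; exact ⟨by omega, hio, hm⟩
          · rintro ⟨hj, hio, hm⟩
            refine ⟨?_, hio, hm⟩
            by_contra hjk
            have hjk' : j = k := by omega
            rw [hjk'] at hm
            obtain ⟨hm1, hm2, hm3, hm4⟩ := hm
            rcases Nat.lt_or_ge i k with hik' | hik'
            · rcases C i hik' hio with hmem | hsome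
              · obtain ⟨s, hs, hsi⟩ := List.mem_iff_getElem.mp hmem
                obtain ⟨h1, _, _, h4⟩ := S s hs
                rw [hsi] at h1 h4
                have := h4 k (by omega) (by omega)
                omega
              · obtain ⟨j₀, hj₀⟩ := Option.isSome_iff_exists.mp hsome
                obtain ⟨hj₀k, _, hm₀⟩ := (M i j₀).mp hj₀
                have := pvIsMatch_unique hm₀ ⟨hm1, hm2, hm3, hm4⟩
                omega
            · have hik : i = k := by omega
              rw [hik] at hio
              exact hco hio
        · intro i hi hio
          rcases Nat.lt_or_ge i k with h | h
          · exact C i h hio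
          · have hik : i = k := by omega
            rw [hik] at hio
            exact absurd hio hco
  · have hke : k = cs.length := by omega
    subst hke
    rw [List.drop_length]
    simpa only [pvStk] using hinv
termination_by cs.length - k
decreasing_by all_goals omega

-- pointwise agreement of the two per-pair bodies, given the final stack invariant
lemma pvType_eq (code : String) (op cl : Char) (hop : op ≠ cl)
    (spans : List (Int × Int)) :
    pvTypeA code op cl spans = pvTypeB code op cl spans := by
  unfold pvTypeA pvTypeB
  have hinv0 : pvStkInv code.toList op cl 0 [] PySem.Dict.empty := by
    refine ⟨fun s hs => absurd hs (by simp), fun i j => ?_, fun i hi => absurd hi (by omega)⟩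
    constructor
    · intro h; rw [PySem.Dict.get?_empty] at h; exact absurd h (by simp)
    · rintro ⟨hj, _⟩; exact absurd hj (by omega)
  have hrun := pvStk_run code.toList op cl hop 0 [] PySem.Dict.empty (Nat.zero_le _) hinv0
  rw [List.drop_zero] at hrun
  obtain ⟨Sf, Mf, Cf⟩ := hrun
  apply List.foldl_ext
  intro acc i hi
  have hi' : i < code.toList.length := List.mem_range.mp hi
  by_cases hio : code.toList.getD i ' ' = op
  · rw [if_pos hio]
    obtain ⟨c1, c2, c3, c4, c5, c6⟩ :=
      pvInner_spec code.toList op cl (i + 1) 1 (by omega) one_pos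
    have hpre1 : pvPre code.toList op cl (i + 1) = pvPre code.toList op cl i + 1 := by
      rw [pvPre_succ code.toList op cl i hi', hio, pvDelta_op hop]
    by_cases hz : (pvInner code.toList op cl (i + 1) 1).1 = 0
    · have hm : pvIsMatch code.toList op cl i (pvInner code.toList op cl (i + 1) 1).2 := by
        refine ⟨by omega, c2, by omega, ?_⟩
        intro l hl1 hl2
        have := c4 l (by omega) hl2
        omega
      have hsome : ((pvStk op cl code.toList 0 ([], PySem.Dict.empty)).2).get? i =
          some ((pvInner code.toList op cl (i + 1) 1).2 - 1) := by
        rcases Cf i hi' hio with hmem | hs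
        · exfalso
          obtain ⟨s, hs', hsi⟩ := List.mem_iff_getElem.mp hmem
          obtain ⟨_, _, _, hpos⟩ := Sf s hs'
          rw [hsi] at hpos
          have := hpos (pvInner code.toList op cl (i + 1) 1).2 hm.1 c2
          have h3 := hm.2.2.1
          omega
        · obtain ⟨j₀, hj₀⟩ := Option.isSome_iff_exists.mp hs
          obtain ⟨_, _, hm₀⟩ := (Mf i j₀).mp hj₀
          have := pvIsMatch_unique hm₀ hm
          rw [hj₀]
          congr 1
          omega
      rw [hsome]
      have hge : 1 ≤ (pvInner code.toList op cl (i + 1) 1).2 := by omega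
      simp only [Nat.cast_sub hge, Nat.cast_one]
      rw [if_pos hz, sub_add_cancel]
    · rw [if_neg hz]
      have hnone : ((pvStk op cl code.toList 0 ([], PySem.Dict.empty)).2).get? i = none := by
        cases h : ((pvStk op cl code.toList 0 ([], PySem.Dict.empty)).2).get? i with
        | none => rfl
        | some j₀ =>
          exfalso
          obtain ⟨_, _, hm₀⟩ := (Mf i j₀).mp h
          obtain ⟨hm1, hm2, hm3, hm4⟩ := hm₀
          have hd2 : (pvInner code.toList op cl (i + 1) 1).2 = code.toList.length := by
            by_contra hne
            have := c5 (by omega)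
            omega
          rw [hd2] at c3
          rcases Nat.lt_or_ge (j₀ + 1) code.toList.length with hl | hl
          · have := c4 (j₀ + 1) (by omega) (by omega)
            omega
          · have hje : j₀ + 1 = code.toList.length := by omega
            rw [hje] at hm3
            omega
      rw [hnone]
  · rw [if_neg hio]
    have hnone : ((pvStk op cl code.toList 0 ([], PySem.Dict.empty)).2).get? i = none := by
      cases h : ((pvStk op cl code.toList 0 ([], PySem.Dict.empty)).2).get? i with
      | none => rfl
      | some j₀ => exact absurd ((Mf i j₀).mp h).2.1 hio
    rw [hnone]

-- ===== VERDICT (by name: the statement is the Claim_ definition above) =====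
theorem get_bracket_spans_spec : Claim_equal_get_bracket_spans := by
  intro code _
  unfold Spec_get_bracket_spans get_bracket_spans get_bracket_spans_alt
  simp only [List.foldl]
  rw [pvType_eq code '(' ')' (by decide), pvType_eq code '[' ']' (by decide),
    pvType_eq code '{' '}' (by decide)]
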